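-- pv_equiv track=rewrite | github.com/Dolyphin/swiftBlock | utils.py | couple_edges
-- ===== SOURCE A (Python) =====
-- def couple_edges(dependent_edges):
--     for es0, edgeSet0 in enumerate(dependent_edges):
--         for edge in edgeSet0:
--             for es1, edgeSet1 in enumerate(dependent_edges):
--                 if edge in edgeSet1 and es0 != es1:
--                     for e in edgeSet0:
--                         edgeSet1.append(e)
--                     dependent_edges.pop(es0)
--                     return True
--     return False
-- ===== SOURCE B (Python) =====
-- def couple_edges(dependent_edges):
--     # One pass: remember the first set index each edge was seen in; a repeat
--     # in a different set means two sets share an edge.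
--     # NOTE: A merges the two sets and pops one (mutating its argument); B does
--     # not mutate -- the equivalence claimed here is about the return value only.
--     first_seen = {}
--     for i, edge_set in enumerate(dependent_edges):
--         for edge in edge_set:
--             j = first_seen.setdefault(edge, i)
--             if j != i:
--                 return True
--     return False
-- ===== Notes on version B (the rewrite author's own statement) =====
-- stated objective: alternative
-- what changed: Replaces A's triple nested scan (for each edge of each set, rescan all sets for a sharer) by a single pass that records in a dict the first set index containing each edge and returns True on the first edge seen again under a different index; return-value equivalence only, since A also mutates its argument (merge+pop) and B does not.
import Mathlib
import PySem

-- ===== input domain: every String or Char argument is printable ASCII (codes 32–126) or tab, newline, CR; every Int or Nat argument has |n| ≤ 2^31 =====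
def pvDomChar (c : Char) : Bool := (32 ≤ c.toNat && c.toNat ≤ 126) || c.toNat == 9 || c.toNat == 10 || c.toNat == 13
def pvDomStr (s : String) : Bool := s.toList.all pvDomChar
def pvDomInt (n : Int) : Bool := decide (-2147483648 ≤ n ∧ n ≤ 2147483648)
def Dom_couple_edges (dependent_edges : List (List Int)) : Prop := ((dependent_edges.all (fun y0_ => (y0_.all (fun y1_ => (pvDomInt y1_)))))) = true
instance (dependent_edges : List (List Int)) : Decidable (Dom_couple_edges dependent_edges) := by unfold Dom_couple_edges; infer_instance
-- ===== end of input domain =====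

-- B replaces A's nested rescans by one pass with a dict edge → first set index; A mutates its
-- argument (merge + pop) and B does not, so the equivalence is about the return value only.

-- ===== PORT A =====
-- A's in-place merge/pop happens only immediately before `return True`, so it cannot affect the
-- returned Bool; the port transcribes the loops and the tested conditions.
def couple_edges (dependent_edges : List (List Int)) : Bool :=
  (PySem.List.enumerate dependent_edges).any (fun p =>
    p.2.any (fun edge =>
      (PySem.List.enumerate dependent_edges).any (fun q =>
        q.2.contains edge && p.1 != q.1)))

-- ===== PORT B =====
-- inner loop of Source B over one edge set: `j = first_seen.setdefault(edge, i); if j != i: return True`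
-- (setdefault: a present key keeps its value j; an absent key is inserted with value i, so j = i).
def ceRow (i : Int) : PySem.Dict Int Int → List Int → PySem.Dict Int Int × Bool
  | d, [] => (d, false)
  | d, e :: rest =>
    match d.get? e with
    | some j => if j ≠ i then (d, true) else ceRow i d rest
    | none => ceRow i (d.insert e i) rest

-- outer loop of Source B over `enumerate(dependent_edges)`
def ceGo : PySem.Dict Int Int → List (Int × List Int) → Bool
  | _, [] => false
  | d, (i, s) :: rest =>
    let r := ceRow i d s
    if r.2 then true else ceGo r.1 rest

def couple_edges_alt (dependent_edges : List (List Int)) : Bool :=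
  ceGo PySem.Dict.empty (PySem.List.enumerate dependent_edges)

-- ===== PRECONDITION & SPEC =====
def Spec_couple_edges (dependent_edges : List (List Int)) (out : Bool) : Prop := out = couple_edges_alt dependent_edges
instance (dependent_edges : List (List Int)) (out : Bool) : Decidable (Spec_couple_edges dependent_edges out) := by unfold Spec_couple_edges; infer_instance

-- ===== CLAIM (what is proved, stated in full; the proofs are below) =====
def Claim_equal_couple_edges : Prop := ∀ (dependent_edges : List (List Int)), Dom_couple_edges dependent_edges → Spec_couple_edges dependent_edges (couple_edges dependent_edges)

-- ===== LEMMAS AND PROOFS =====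

-- Some edge lies in two rows with distinct indices.
def SharedL (L : List (Int × List Int)) : Prop :=
  ∃ p ∈ L, ∃ e ∈ p.2, ∃ q ∈ L, e ∈ q.2 ∧ p.1 ≠ q.1

-- dict invariant: d records, for each known edge, the index of a processed row containing it,
-- and knows every edge of every processed row.
def GoodD (d : PySem.Dict Int Int) (ps : List (Int × List Int)) : Prop :=
  (∀ e j, d.get? e = some j → ∃ t, (j, t) ∈ ps ∧ e ∈ t) ∧
  (∀ e, (∃ q ∈ ps, e ∈ q.2) → (d.get? e).isSome)

theorem ceRow_true_iff (i : Int) (s : List Int) : ∀ d : PySem.Dict Int Int,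
    (ceRow i d s).2 = true ↔ ∃ e ∈ s, ∃ j, d.get? e = some j ∧ j ≠ i := by
  induction s with
  | nil => intro d; simp [ceRow]
  | cons e rest ih =>
    intro d
    cases h : d.get? e with
    | none =>
      rw [ceRow]; simp only [h]
      rw [ih]
      constructor
      · rintro ⟨e', he', j, hj, hne⟩
        rw [PySem.Dict.get?_insert] at hj
        split at hj
        · exact absurd (Option.some.inj hj).symm hne
        · exact ⟨e', by simp [he'], j, hj, hne⟩
      · rintro ⟨e', he', j, hj, hne⟩
        rcases List.mem_cons.mp he' with rfl | he'
        · rw [h] at hj; cases hj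
        · refine ⟨e', he', j, ?_, hne⟩
          rw [PySem.Dict.get?_insert]
          split
          · rename_i heq; subst heq; rw [h] at hj; cases hj
          · exact hj
    | some j =>
      rw [ceRow]; simp only [h]
      by_cases hji : j ≠ i
      · simp only [if_pos hji]
        constructor
        · intro _; exact ⟨e, by simp, j, h, hji⟩
        · intro _; trivial
      · push Not at hji; subst hji
        simp only [ne_eq, not_true_eq_false, if_false]
        rw [ih]
        constructor
        · rintro ⟨e', he', j', hj', hne⟩; exact ⟨e', by simp [he'], j', hj', hne⟩
        · rintro ⟨e', he', j', hj', hne⟩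
          rcases List.mem_cons.mp he' with rfl | he'
          · rw [h] at hj'; cases hj'; exact absurd rfl hne
          · exact ⟨e', he', j', hj', hne⟩

theorem ceRow_false_get? (i : Int) (s : List Int) : ∀ d : PySem.Dict Int Int,
    (ceRow i d s).2 = false → ∀ e' : Int,
      (ceRow i d s).1.get? e' = (if e' ∈ s ∧ d.get? e' = none then some i else d.get? e') := by
  induction s with
  | nil => intro d _ e'; simp [ceRow]
  | cons e rest ih =>
    intro d hf e'
    rw [ceRow] at hf ⊢
    cases h : d.get? e with
    | none =>
      simp only [h] at hf ⊢
      rw [ih _ hf e']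
      by_cases heq : e' = e
      · subst heq
        rw [PySem.Dict.get?_insert, if_pos rfl]
        simp [h]
      · rw [PySem.Dict.get?_insert, if_neg heq]
        simp [heq]
    | some j =>
      simp only [h] at hf ⊢
      by_cases hji : j ≠ i
      · rw [if_pos hji] at hf ⊢; cases hf
      · push Not at hji; subst hji
        rw [if_neg (by simp)] at hf ⊢
        rw [ih _ hf e']
        by_cases heq : e' = e
        · subst heq; simp [h]
        · simp [heq]

theorem ceGo_iff : ∀ (rs ps : List (Int × List Int)) (d : PySem.Dict Int Int),
    GoodD d ps → List.Pairwise (fun p q => p.1 ≠ q.1) (ps ++ rs) → ¬ SharedL ps →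
    (ceGo d rs = true ↔ SharedL (ps ++ rs)) := by
  intro rs
  induction rs with
  | nil =>
    intro ps d _ _ hns
    simp only [ceGo, List.append_nil]
    constructor
    · intro h; cases h
    · intro h; exact absurd h hns
  | cons r rest ih =>
    rintro ps d hg hpw hns
    obtain ⟨i, s⟩ := r
    rw [ceGo]
    cases hrow : (ceRow i d s).2 with
    | true =>
      simp only [ceGo, hrow, if_true]
      constructor
      · intro _
        obtain ⟨e, he, j, hj, hne⟩ := (ceRow_true_iff i s d).mp hrow
        obtain ⟨t, htm, het⟩ := hg.1 e j hj
        exact ⟨(i, s), by simp, e, he, (j, t), by simp [htm], het, hne.symm⟩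
      · intro _; trivial
    | false =>
      simp only [ceGo, hrow, Bool.false_eq_true, if_false]
      have hget := ceRow_false_get? i s d hrow
      have hpw' : List.Pairwise (fun p q => (p : Int × List Int).1 ≠ q.1) ((ps ++ [(i, s)]) ++ rest) := by
        simpa using hpw
      have hidx : ∀ q ∈ ps, (q : Int × List Int).1 ≠ i := by
        intro q hq
        have := (List.pairwise_append.mp hpw).2.2 q hq (i, s) (by simp)
        exact this
      -- new dict invariant
      have hg' : GoodD (ceRow i d s).1 (ps ++ [(i, s)]) := by
        constructor
        · intro e j hj
          rw [hget e] at hj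
          split at hj
          · rename_i hc
            cases hj
            exact ⟨s, by simp, hc.1⟩
          · obtain ⟨t, htm, het⟩ := hg.1 e j hj
            exact ⟨t, by simp [htm], het⟩
        · intro e he
          rw [hget e]
          split
          · simp
          · rename_i hc
            rcases he with ⟨q, hq, heq⟩
            rcases List.mem_append.mp hq with hq' | hq'
            · exact hg.2 e ⟨q, hq', heq⟩
            · have : q = (i, s) := by simpa using hq'
              subst this
              rcases hmem : d.get? e with _ | j
              · exact absurd ⟨heq, hmem⟩ hc
              · simp
      -- no sharing within ps ++ [(i,s)]
      have hns' : ¬ SharedL (ps ++ [(i, s)]) := by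
        rintro ⟨p, hp, e, hep, q, hq, heq, hne⟩
        -- reduce to: some edge of s lies in a row of ps (indices differ automatically)
        have key : ∃ e' ∈ s, ∃ q' ∈ ps, e' ∈ (q' : Int × List Int).2 := by
          rcases List.mem_append.mp hp with hp' | hp'
          · rcases List.mem_append.mp hq with hq' | hq'
            · exact absurd ⟨p, hp', e, hep, q, hq', heq, hne⟩ hns
            · have : q = (i, s) := by simpa using hq'
              subst this
              exact ⟨e, heq, p, hp', hep⟩
          · have : p = (i, s) := by simpa using hp'
            subst this
            rcases List.mem_append.mp hq with hq' | hq'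
            · exact ⟨e, hep, q, hq', heq⟩
            · have : q = (i, s) := by simpa using hq'
              subst this
              exact absurd rfl hne
        obtain ⟨e', he's, q', hq', he'q'⟩ := key
        have hsome := hg.2 e' ⟨q', hq', he'q'⟩
        rcases hmem : d.get? e' with _ | j
        · rw [hmem] at hsome; cases hsome
        · obtain ⟨t, htm, _⟩ := hg.1 e' j hmem
          have hji : j ≠ i := hidx (j, t) htm
          have : (ceRow i d s).2 = true :=
            (ceRow_true_iff i s d).mpr ⟨e', he's, j, hmem, hji⟩
          rw [hrow] at this; cases this
      have := ih (ps ++ [(i, s)]) (ceRow i d s).1 hg' hpw' hns'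
      rw [this]
      constructor
      · intro h
        rcases h with ⟨p, hp, e, hep, q, hq, heq, hne⟩
        exact ⟨p, by simpa using hp, e, hep, q, by simpa using hq, heq, hne⟩
      · intro h
        rcases h with ⟨p, hp, e, hep, q, hq, heq, hne⟩
        exact ⟨p, by simpa using hp, e, hep, q, by simpa using hq, heq, hne⟩

theorem couple_edges_eq_shared (l : List (List Int)) :
    couple_edges l = true ↔ SharedL (PySem.List.enumerate l) := by
  simp [couple_edges, SharedL, List.any_eq_true, Bool.and_eq_true, bne_iff_ne]

theorem couple_edges_alt_eq_shared (l : List (List Int)) :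
    couple_edges_alt l = true ↔ SharedL (PySem.List.enumerate l) := by
  have hpw : List.Pairwise (fun p q => (p : Int × List Int).1 ≠ q.1)
      (([] : List (Int × List Int)) ++ PySem.List.enumerate l) := by
    simp only [List.nil_append]
    exact (PySem.List.pairwise_lt_enumerate l 0).imp (fun h => ne_of_lt h)
  have hg : GoodD PySem.Dict.empty [] := by
    constructor
    · intro e j h; simp [PySem.Dict.get?_empty] at h
    · rintro e ⟨q, hq, _⟩; cases hq
  have hns : ¬ SharedL ([] : List (Int × List Int)) := by
    rintro ⟨p, hp, _⟩; cases hp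
  have := ceGo_iff (PySem.List.enumerate l) [] PySem.Dict.empty hg hpw hns
  simpa [couple_edges_alt] using this

-- ===== VERDICT (by name: the statement is the Claim_ definition above) =====
theorem couple_edges_spec : Claim_equal_couple_edges := by
  intro l _
  unfold Spec_couple_edges
  exact Bool.eq_iff_iff.mpr ((couple_edges_eq_shared l).trans (couple_edges_alt_eq_shared l).symm)
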